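-- pv_equiv track=rewrite | github.com/Roman-racer1-hue/Blockblust_bot_tg | game_logic.py | place_shape
-- ===== SOURCE A (Python) =====
-- import copy
--
-- def can_place_shape(grid, shape, x, y):
--     """
--     Проверяет можно ли разместить фигуру в позиции (x, y)
--     """
--     if not grid or not shape:
--         return False
--
--     grid_height = len(grid)
--     grid_width = len(grid[0]) if grid_height > 0 else 0
--
--     shape_height = len(shape)
--     shape_width = len(shape[0]) if shape_height > 0 else 0
--
--     # Проверка границ
--     if (x < 0 or x + shape_width > grid_width or
--         y < 0 or y + shape_height > grid_height):
--         return False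
--
--     # Проверка что все клетки фигуры попадают на пустые клетки
--     for row_idx, row in enumerate(shape):
--         for col_idx, cell in enumerate(row):
--             if cell == 1:  # Часть фигуры
--                 if grid[y + row_idx][x + col_idx] != 0:
--                     return False
--
--     return True
--
-- def place_shape(grid, shape, x, y):
--     """
--     Размещает фигуру на поле и возвращает новое состояние поля
--     """
--     if not can_place_shape(grid, shape, x, y):
--         return None
--
--     # Создаем копию поля
--     new_grid = copy.deepcopy(grid)
--
--     # Размещаем фигуру
--     for row_idx, row in enumerate(shape):
--         for col_idx, cell in enumerate(row):
--             if cell == 1: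
--                 new_grid[y + row_idx][x + col_idx] = 1
--
--     return new_grid
-- ===== SOURCE B (Python) =====
-- import copy
--
-- def place_shape(grid, shape, x, y):
--     # Fused validate-and-place: one interleaved pass over a deepcopy.
--     if not grid or not shape:
--         return None
--     if (x < 0 or x + len(shape[0]) > len(grid[0]) or
--             y < 0 or y + len(shape) > len(grid)):
--         return None
--     new_grid = copy.deepcopy(grid)
--     for r, row in enumerate(shape):
--         for c, cell in enumerate(row):
--             if cell == 1:
--                 if new_grid[y + r][x + c] != 0:
--                     return None
--                 new_grid[y + r][x + c] = 1
--     return new_grid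
-- ===== Notes on version B (the rewrite author's own statement) =====
-- stated objective: simpler
-- what changed: Fused A's separate can_place_shape validation pass and the placement pass into a single interleaved pass over the deepcopy that bails out with None at the first occupied cell, eliminating the helper.
import Mathlib
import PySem

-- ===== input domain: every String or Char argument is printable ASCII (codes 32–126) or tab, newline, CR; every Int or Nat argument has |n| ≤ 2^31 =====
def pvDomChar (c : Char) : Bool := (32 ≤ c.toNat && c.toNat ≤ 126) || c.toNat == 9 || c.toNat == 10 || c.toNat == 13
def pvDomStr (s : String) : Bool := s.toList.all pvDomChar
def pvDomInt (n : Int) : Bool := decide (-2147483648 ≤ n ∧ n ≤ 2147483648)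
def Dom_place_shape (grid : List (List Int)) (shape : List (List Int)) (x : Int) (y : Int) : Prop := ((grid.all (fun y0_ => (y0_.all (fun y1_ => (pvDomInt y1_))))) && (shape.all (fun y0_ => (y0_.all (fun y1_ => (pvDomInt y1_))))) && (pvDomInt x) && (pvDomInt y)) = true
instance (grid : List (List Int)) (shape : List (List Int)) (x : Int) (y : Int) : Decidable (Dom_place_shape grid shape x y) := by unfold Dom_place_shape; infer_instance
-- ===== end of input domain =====

-- B fuses A's separate can_place_shape validation pass and placement pass into one
-- interleaved pass over the copied grid (objective: simpler). Return-value equivalence only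
-- (neither port models Python's in-place mutation of the deepcopy).


-- shared cell primitives: grid[i][j] read with Python index semantics, and grid[i][j] = 1
def pvRead (g : List (List Int)) (i j : Int) : Int :=
  PySem.List.pyGetD (PySem.List.pyGetD g i ([] : List Int)) j 0
def pvWrite (g : List (List Int)) (i j : Int) : List (List Int) :=
  PySem.List.pySetD g i (PySem.List.pySetD (PySem.List.pyGetD g i ([] : List Int)) j 1)

-- ===== PORT A =====
def can_place_shape (grid : List (List Int)) (shape : List (List Int)) (x : Int) (y : Int) : Bool :=
  if grid = [] ∨ shape = [] then false
  else
    let grid_height : Int := grid.length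
    let grid_width : Int := if grid_height > 0 then (grid.headI.length : Int) else 0
    let shape_height : Int := shape.length
    let shape_width : Int := if shape_height > 0 then (shape.headI.length : Int) else 0
    if x < 0 ∨ x + shape_width > grid_width ∨ y < 0 ∨ y + shape_height > grid_height then false
    else
      (PySem.List.enumerate shape 0).all (fun rc =>
        (PySem.List.enumerate rc.2 0).all (fun cc =>
          if cc.2 = 1 then decide (pvRead grid (y + rc.1) (x + cc.1) = 0) else true))

def place_shape (grid : List (List Int)) (shape : List (List Int)) (x : Int) (y : Int) : Option (List (List Int)) :=
  if can_place_shape grid shape x y = false then none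
  else
    some ((PySem.List.enumerate shape 0).foldl (fun g rc =>
      (PySem.List.enumerate rc.2 0).foldl (fun g2 cc =>
        if cc.2 = 1 then pvWrite g2 (y + rc.1) (x + cc.1) else g2) g) grid)

-- ===== PORT B =====
def psGoRow (x y r : Int) (g : List (List Int)) : List (Int × Int) → Option (List (List Int))
  | [] => some g
  | cc :: rest =>
      if cc.2 = 1 then
        if pvRead g (y + r) (x + cc.1) ≠ 0 then none
        else psGoRow x y r (pvWrite g (y + r) (x + cc.1)) rest
      else psGoRow x y r g rest

def psGo (x y : Int) (g : List (List Int)) : List (Int × List Int) → Option (List (List Int))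
  | [] => some g
  | rc :: rest =>
      match psGoRow x y rc.1 g (PySem.List.enumerate rc.2 0) with
      | none => none
      | some g' => psGo x y g' rest

def place_shape_alt (grid : List (List Int)) (shape : List (List Int)) (x : Int) (y : Int) : Option (List (List Int)) :=
  if grid = [] ∨ shape = [] then none
  else if x < 0 ∨ x + (shape.headI.length : Int) > (grid.headI.length : Int) ∨
          y < 0 ∨ y + (shape.length : Int) > (grid.length : Int) then none
  else psGo x y grid (PySem.List.enumerate shape 0)

-- ===== PRECONDITION & SPEC =====
-- Pre_ excludes exactly the inputs where Python A raises IndexError: a ragged grid/shape can make a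
-- shape cell equal to 1 address a column beyond the length of the actual grid row it lands on.
def Pre_place_shape (grid : List (List Int)) (shape : List (List Int)) (x : Int) (y : Int) : Prop :=
  (grid ≠ [] ∧ shape ≠ [] ∧ 0 ≤ x ∧ 0 ≤ y ∧
     x + (shape.headI.length : Int) ≤ (grid.headI.length : Int) ∧
     y + (shape.length : Int) ≤ (grid.length : Int)) →
  ∀ r : Nat, r < shape.length → ∀ c : Nat, c < (shape.getD r []).length →
    (shape.getD r []).getD c 0 = 1 → x.toNat + c < (grid.getD (y.toNat + r) []).length
instance (grid : List (List Int)) (shape : List (List Int)) (x : Int) (y : Int) : Decidable (Pre_place_shape grid shape x y) := by unfold Pre_place_shape; infer_instance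
def pvWitness_place_shape : List (List Int) × List (List Int) × Int × Int := ([[0, 0], [2, 0]], [[1]], 1, 0)
def Spec_place_shape (grid : List (List Int)) (shape : List (List Int)) (x : Int) (y : Int) (out : Option (List (List Int))) : Prop := out = place_shape_alt grid shape x y
instance (grid : List (List Int)) (shape : List (List Int)) (x : Int) (y : Int) (out : Option (List (List Int))) : Decidable (Spec_place_shape grid shape x y out) := by unfold Spec_place_shape; infer_instance

-- ===== CLAIM (what is proved, stated in full; the proofs are below) =====
def Claim_equal_place_shape : Prop := ∀ (grid : List (List Int)) (shape : List (List Int)) (x : Int) (y : Int), Dom_place_shape grid shape x y → Pre_place_shape grid shape x y → Spec_place_shape grid shape x y (place_shape grid shape x y)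

-- ===== LEMMAS AND PROOFS =====

lemma pyGetD_pySetD_ne {α : Type} (xs : List α) (i i' : Int) (v : α) (d : α)
    (hi : 0 ≤ i) (hi' : 0 ≤ i') (hne : i ≠ i') :
    PySem.List.pyGetD (PySem.List.pySetD xs i v) i' d = PySem.List.pyGetD xs i' d := by
  rw [PySem.List.pySetD_of_nonneg xs v hi, PySem.List.pyGetD_of_nonneg _ d hi',
    PySem.List.pyGetD_of_nonneg _ d hi']
  have hn : i.toNat ≠ i'.toNat := by omega
  simp [List.getD_eq_getElem?_getD, hn]

lemma pvRead_pvWrite_ne (g : List (List Int)) (i j i' j' : Int)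
    (hi : 0 ≤ i) (hj : 0 ≤ j) (hi' : 0 ≤ i') (hj' : 0 ≤ j')
    (hne : i ≠ i' ∨ j ≠ j') :
    pvRead (pvWrite g i j) i' j' = pvRead g i' j' := by
  unfold pvRead pvWrite
  rcases hne with h | h
  · rw [pyGetD_pySetD_ne _ _ _ _ _ hi hi' h]
  · by_cases hrow : i = i'
    · subst hrow
      rw [PySem.List.pySetD_of_nonneg g _ hi, PySem.List.pyGetD_of_nonneg _ _ hi,
        PySem.List.pyGetD_of_nonneg _ _ hi]
      by_cases hlen : i.toNat < g.length
      · have hrow1 : (g.set i.toNat (PySem.List.pySetD (g.getD i.toNat []) j 1)).getD i.toNat ([] : List Int)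
            = PySem.List.pySetD (g.getD i.toNat []) j 1 := by
          simp [List.getD_eq_getElem?_getD, hlen]
        rw [hrow1, pyGetD_pySetD_ne _ _ _ _ _ hj hj' h]
      · rw [List.set_eq_of_length_le (by omega)]
    · rw [pyGetD_pySetD_ne _ _ _ _ _ hi hi' hrow]

lemma all_congr' {α : Type} (l : List α) (f g : α → Bool) (h : ∀ x ∈ l, f x = g x) :
    l.all f = l.all g := by
  induction l with
  | nil => rfl
  | cons a t ih =>
      simp only [List.all_cons, h a (by simp), ih (fun x hx => h x (by simp [hx]))]

-- one row: the interleaved pass equals check-then-write, reading/writing only row y+r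
lemma psGoRow_spec (x y r : Int) (hx : 0 ≤ x) (hyr : 0 ≤ y + r) :
    ∀ (cells : List (Int × Int)) (g : List (List Int)),
      (∀ p ∈ cells, 0 ≤ p.1) → cells.Pairwise (fun p q => p.1 < q.1) →
      psGoRow x y r g cells =
        if cells.all (fun cc => if cc.2 = 1 then decide (pvRead g (y + r) (x + cc.1) = 0) else true)
        then some (cells.foldl (fun g2 cc => if cc.2 = 1 then pvWrite g2 (y + r) (x + cc.1) else g2) g)
        else none := by
  intro cells
  induction cells with
  | nil => intro g _ _; simp [psGoRow]
  | cons cc rest ih =>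
      intro g hpos hpw
      have hcpos : 0 ≤ cc.1 := hpos cc (by simp)
      rw [psGoRow]
      by_cases h1 : cc.2 = 1
      · by_cases h0 : pvRead g (y + r) (x + cc.1) = 0
        · rw [if_pos h1, if_neg (by simp [h0])]
          rw [ih (pvWrite g (y + r) (x + cc.1)) (fun p hp => hpos p (by simp [hp]))
              (List.Pairwise.of_cons hpw)]
          have hall : rest.all (fun c2 => if c2.2 = 1 then
                decide (pvRead (pvWrite g (y + r) (x + cc.1)) (y + r) (x + c2.1) = 0) else true)
              = rest.all (fun c2 => if c2.2 = 1 then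
                decide (pvRead g (y + r) (x + c2.1) = 0) else true) := by
            apply all_congr'
            intro p hp
            have hlt : cc.1 < p.1 := (List.pairwise_cons.mp hpw).1 p hp
            rw [pvRead_pvWrite_ne g (y + r) (x + cc.1) (y + r) (x + p.1) hyr (by omega) hyr
                (by have := hpos p (by simp [hp]); omega) (Or.inr (by omega))]
          rw [hall]
          have helem : (if cc.2 = 1 then decide (pvRead g (y + r) (x + cc.1) = 0) else true) = true := by
            simp [h1, h0]
          simp only [List.all_cons, helem, Bool.true_and, List.foldl_cons, if_pos h1]
        · rw [if_pos h1, if_pos (by simpa using h0)]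
          have helem : (if cc.2 = 1 then decide (pvRead g (y + r) (x + cc.1) = 0) else true) = false := by
            simp [h1, h0]
          simp only [List.all_cons, helem, Bool.false_and]
          simp
      · rw [if_neg h1]
        rw [ih g (fun p hp => hpos p (by simp [hp])) (List.Pairwise.of_cons hpw)]
        simp only [List.all_cons, List.foldl_cons, if_neg h1, Bool.true_and]

-- the row fold leaves every other grid row unchanged
lemma foldl_write_other_row (x y r : Int) (hx : 0 ≤ x) (hyr : 0 ≤ y + r) :
    ∀ (cells : List (Int × Int)) (g : List (List Int)) (i j : Int),
      (∀ p ∈ cells, 0 ≤ p.1) → 0 ≤ i → 0 ≤ j → i ≠ y + r →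
      pvRead (cells.foldl (fun g2 cc => if cc.2 = 1 then pvWrite g2 (y + r) (x + cc.1) else g2) g) i j
        = pvRead g i j := by
  intro cells
  induction cells with
  | nil => intro g i j _ _ _ _; rfl
  | cons cc rest ih =>
      intro g i j hpos hi hj hne
      have hcpos : 0 ≤ cc.1 := hpos cc (by simp)
      simp only [List.foldl_cons]
      by_cases h1 : cc.2 = 1
      · simp only [h1]
        rw [ih _ i j (fun p hp => hpos p (by simp [hp])) hi hj hne]
        exact pvRead_pvWrite_ne g (y + r) (x + cc.1) i j hyr (by omega) hi hj
          (Or.inl (fun h => hne h.symm))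
      · simp only [if_neg h1]
        exact ih g i j (fun p hp => hpos p (by simp [hp])) hi hj hne

-- all rows: the interleaved pass equals check-all-then-write-all
lemma psGo_spec (x y : Int) (hx : 0 ≤ x) (hy : 0 ≤ y) :
    ∀ (rows : List (Int × List Int)) (g : List (List Int)),
      (∀ p ∈ rows, 0 ≤ p.1) → rows.Pairwise (fun p q => p.1 < q.1) →
      psGo x y g rows =
        if rows.all (fun rc => (PySem.List.enumerate rc.2 0).all (fun cc =>
              if cc.2 = 1 then decide (pvRead g (y + rc.1) (x + cc.1) = 0) else true))
        then some (rows.foldl (fun g1 rc => (PySem.List.enumerate rc.2 0).foldl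
              (fun g2 cc => if cc.2 = 1 then pvWrite g2 (y + rc.1) (x + cc.1) else g2) g1) g)
        else none := by
  intro rows
  induction rows with
  | nil => intro g _ _; simp [psGo]
  | cons rc rest ih =>
      intro g hpos hpw
      have hrpos : 0 ≤ rc.1 := hpos rc (by simp)
      have hcellpos : ∀ p ∈ PySem.List.enumerate rc.2 0, 0 ≤ p.1 := by
        intro p hp
        obtain ⟨k, hk, rfl⟩ := (PySem.List.mem_enumerate_iff _ _ _).mp hp
        simp
      have hcellpw : (PySem.List.enumerate rc.2 0).Pairwise (fun p q => p.1 < q.1) :=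
        PySem.List.pairwise_lt_enumerate _ _
      rw [psGo, psGoRow_spec x y rc.1 hx (by omega) _ g hcellpos hcellpw]
      by_cases hrow : (PySem.List.enumerate rc.2 0).all (fun cc =>
          if cc.2 = 1 then decide (pvRead g (y + rc.1) (x + cc.1) = 0) else true)
      · simp only [if_pos hrow]
        rw [ih _ (fun p hp => hpos p (by simp [hp])) (List.Pairwise.of_cons hpw)]
        have hall : rest.all (fun rc2 => (PySem.List.enumerate rc2.2 0).all (fun cc =>
              if cc.2 = 1 then decide (pvRead ((PySem.List.enumerate rc.2 0).foldl
                (fun g2 cc => if cc.2 = 1 then pvWrite g2 (y + rc.1) (x + cc.1) else g2) g)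
                (y + rc2.1) (x + cc.1) = 0) else true))
            = rest.all (fun rc2 => (PySem.List.enumerate rc2.2 0).all (fun cc =>
              if cc.2 = 1 then decide (pvRead g (y + rc2.1) (x + cc.1) = 0) else true)) := by
          apply all_congr'
          intro q hq
          have hlt : rc.1 < q.1 := (List.pairwise_cons.mp hpw).1 q hq
          apply all_congr'
          intro p hp
          have hppos : 0 ≤ p.1 := by
            obtain ⟨k, hk, rfl⟩ := (PySem.List.mem_enumerate_iff _ _ _).mp hp
            simp
          rw [foldl_write_other_row x y rc.1 hx (by omega) _ g (y + q.1) (x + p.1)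
              hcellpos (by omega) (by omega) (by omega)]
        rw [hall]
        simp only [List.all_cons, hrow, Bool.true_and, List.foldl_cons]
      · rw [if_neg hrow]
        have hf : ((PySem.List.enumerate rc.2 0).all fun cc =>
            if cc.2 = 1 then decide (pvRead g (y + rc.1) (x + cc.1) = 0) else true) = false :=
          Bool.eq_false_iff.mpr hrow
        simp only [List.all_cons, hf, Bool.false_and]
        rw [if_neg Bool.false_ne_true]

-- ===== VERDICT (by name: the statement is the Claim_ definition above) =====
theorem place_shape_spec : Claim_equal_place_shape := by
  intro grid shape x y _hDom _hPre
  unfold Spec_place_shape place_shape place_shape_alt can_place_shape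
  by_cases h1 : grid = [] ∨ shape = []
  · simp [h1]
  · have hg : grid ≠ [] := fun h => h1 (Or.inl h)
    have hs : shape ≠ [] := fun h => h1 (Or.inr h)
    have hglen : (0 : Int) < grid.length := by
      have := List.length_pos_iff.mpr hg; exact_mod_cast this
    have hslen : (0 : Int) < shape.length := by
      have := List.length_pos_iff.mpr hs; exact_mod_cast this
    simp only [if_neg h1, if_pos (show (0:Int) < grid.length from hglen),
      if_pos (show (0:Int) < shape.length from hslen), gt_iff_lt]
    by_cases h2 : x < 0 ∨ (grid.headI.length : Int) < x + (shape.headI.length : Int) ∨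
        y < 0 ∨ (grid.length : Int) < y + (shape.length : Int)
    · simp only [if_pos h2]
      simp
    · simp only [if_neg h2]
      have hx : 0 ≤ x := by omega
      have hy : 0 ≤ y := by omega
      have hpos : ∀ p ∈ PySem.List.enumerate shape 0, 0 ≤ p.1 := by
        intro p hp
        obtain ⟨k, hk, rfl⟩ := (PySem.List.mem_enumerate_iff _ _ _).mp hp
        simp
      rw [psGo_spec x y hx hy _ grid hpos (PySem.List.pairwise_lt_enumerate _ _)]
      cases hc : (PySem.List.enumerate shape 0).all (fun rc =>
          (PySem.List.enumerate rc.2 0).all fun cc =>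
            if cc.2 = 1 then decide (pvRead grid (y + rc.1) (x + cc.1) = 0) else true) <;>
        simp
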